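-- pv_equiv track=rewrite | github.com/kkr010128/codebert | problem152/problem152_142.py | check
-- ===== SOURCE A (Python) =====
-- def check(s):
--     h = 0
--     for p in s:
--         b = h + p[0]
--         if b < 0:
--             return False
--         h += p[1]
--     return True
-- ===== SOURCE B (Python) =====
-- def check(s):
--     seq = list(s)
--     prefix = [0]
--     for p in seq:
--         prefix.append(prefix[-1] + p[1])
--     return all(prefix[i] + seq[i][0] >= 0 for i in range(len(seq)))
-- ===== Notes on version B (the rewrite author's own statement) =====
-- stated objective: alternative
-- what changed: Replaces the interleaved single-pass early-exit scan with building a prefix-sum table of the running balance and then checking the whole sequence with all().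
import Mathlib
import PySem

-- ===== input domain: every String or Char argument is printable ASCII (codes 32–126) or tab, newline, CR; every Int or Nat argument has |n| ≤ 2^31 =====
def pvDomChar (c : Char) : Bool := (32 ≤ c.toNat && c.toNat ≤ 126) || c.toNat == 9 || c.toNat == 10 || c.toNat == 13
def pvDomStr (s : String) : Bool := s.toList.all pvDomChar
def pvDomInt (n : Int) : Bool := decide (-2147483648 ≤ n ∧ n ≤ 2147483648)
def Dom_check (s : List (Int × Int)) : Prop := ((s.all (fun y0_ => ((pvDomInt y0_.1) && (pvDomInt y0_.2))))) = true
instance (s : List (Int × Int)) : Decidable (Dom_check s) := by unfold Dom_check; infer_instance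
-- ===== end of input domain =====

-- B replaces A's single-pass early-exit scan by a prefix-sum table plus a whole-sequence all() check (alternative decomposition, same cost).


-- ===== PORT A =====
-- loop with running balance h and early exit
def checkGo (h : Int) : List (Int × Int) → Bool
  | [] => true
  | p :: t => if h + p.1 < 0 then false else checkGo (h + p.2) t

def check (s : List (Int × Int)) : Bool := checkGo 0 s

-- ===== PORT B =====
-- building prefix: each appended element is previous (prefix[-1]) plus p[1]
def prefixFrom (h : Int) : List (Int × Int) → List Int
  | [] => []
  | p :: t => (h + p.2) :: prefixFrom (h + p.2) t

def check_alt (s : List (Int × Int)) : Bool :=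
  let pre : List Int := 0 :: prefixFrom 0 s
  (List.range s.length).all (fun i => decide (pre.getD i 0 + (s.getD i (0, 0)).1 ≥ 0))

-- ===== PRECONDITION & SPEC =====
def Spec_check (s : List (Int × Int)) (out : Bool) : Prop := out = check_alt s
instance (s : List (Int × Int)) (out : Bool) : Decidable (Spec_check s out) := by unfold Spec_check; infer_instance

-- ===== CLAIM (what is proved, stated in full; the proofs are below) =====
def Claim_equal_check : Prop := ∀ (s : List (Int × Int)), Dom_check s → Spec_check s (check s)

-- ===== LEMMAS AND PROOFS =====
theorem checkGo_eq_table (s : List (Int × Int)) : ∀ (h : Int),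
    checkGo h s =
      (List.range s.length).all
        (fun i => decide ((h :: prefixFrom h s).getD i 0 + (s.getD i (0, 0)).1 ≥ 0)) := by
  induction s with
  | nil => intro h; simp [checkGo]
  | cons p t ih =>
    intro h
    simp only [checkGo, prefixFrom, List.length_cons, List.range_succ_eq_map,
      List.all_cons, List.all_map]
    simp only [Function.comp_def, List.getD_cons_zero, List.getD_cons_succ]
    rw [← ih (h + p.2)]
    by_cases hb : h + p.1 < 0
    · simp [hb, show ¬ (h + p.1 ≥ 0) by omega]
    · simp [hb, show h + p.1 ≥ 0 by omega]

-- ===== VERDICT (by name: the statement is the Claim_ definition above) =====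
theorem check_spec : Claim_equal_check := by
  intro s _
  unfold Spec_check check check_alt
  exact checkGo_eq_table s 0
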